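-- pv_equiv track=rewrite | github.com/aiswaryasaravanan/practice | hackerrank/12-20-containerBall.py | organizingContainers
-- ===== SOURCE A (Python) =====
-- def organizingContainers(container):
--     containerCapacity=[]
--     typeCount=[]
--     for i in range(len(container)):
--         containerCapacity.append(sum(container[i]))
--         typeCount.append(sum(container[x][i] for x in range(len(container))))
--
--     if sorted(containerCapacity)==sorted(typeCount):
--         return "Possible"
--     else:
--         return "Impossible"
-- ===== SOURCE B (Python) =====
-- def organizingContainers(container):
--     n = len(container)
--     balance = {}
--     for i in range(n):
--         r = sum(container[i])
--         balance[r] = balance.get(r, 0) + 1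
--         c = 0
--         for j in range(n):
--             c += container[j][i]
--         balance[c] = balance.get(c, 0) - 1
--     return "Possible" if all(v == 0 for v in balance.values()) else "Impossible"
-- ===== Notes on version B (the rewrite author's own statement) =====
-- stated objective: alternative
-- what changed: Replaces A's sort-both-lists-and-compare with a hash-counter multiset balance: one pass increments a dict entry for each row sum and decrements it for each column sum, and the answer is whether every balance is zero (no sorting, no intermediate sum lists).
import Mathlib
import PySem

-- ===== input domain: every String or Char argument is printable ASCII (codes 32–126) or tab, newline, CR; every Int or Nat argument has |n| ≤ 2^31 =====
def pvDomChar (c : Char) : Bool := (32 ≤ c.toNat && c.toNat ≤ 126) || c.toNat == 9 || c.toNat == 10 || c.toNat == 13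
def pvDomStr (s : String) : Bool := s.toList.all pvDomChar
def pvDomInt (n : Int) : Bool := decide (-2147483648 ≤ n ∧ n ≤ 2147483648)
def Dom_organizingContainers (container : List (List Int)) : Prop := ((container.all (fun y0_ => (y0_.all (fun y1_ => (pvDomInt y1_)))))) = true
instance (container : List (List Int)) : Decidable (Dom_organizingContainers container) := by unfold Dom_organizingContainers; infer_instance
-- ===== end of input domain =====

-- B replaces A's sort-both-lists-and-compare by a dict-counter multiset balance:
-- one pass increments a dict entry per row sum and decrements it per column sum,
-- then checks every balance is zero (objective: alternative algorithm).

-- ===== PORT A =====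
def organizingContainers (container : List (List Int)) : String :=
  let n : Int := container.length
  let st :=
    (PySem.List.pyRange 0 n 1).foldl
      (fun (st : List Int × List Int) i =>
        (st.1 ++ [(PySem.List.pyGetD container i []).sum],
         st.2 ++ [((PySem.List.pyRange 0 n 1).map
                    (fun x => PySem.List.pyGetD (PySem.List.pyGetD container x []) i 0)).sum]))
      ([], [])
  if PySem.List.sorted st.1 (fun v => v) false = PySem.List.sorted st.2 (fun v => v) false then
    "Possible" else "Impossible"

-- ===== PORT B =====
def organizingContainers_alt (container : List (List Int)) : String :=
  let n : Int := container.length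
  let d :=
    (PySem.List.pyRange 0 n 1).foldl
      (fun (d : PySem.Dict Int Int) i =>
        let r := (PySem.List.pyGetD container i []).sum
        let d := d.insert r (d.getD r 0 + 1)
        let c := (PySem.List.pyRange 0 n 1).foldl
          (fun c j => c + PySem.List.pyGetD (PySem.List.pyGetD container j []) i 0) 0
        d.insert c (d.getD c 0 + -1))
      PySem.Dict.empty
  if d.values.all (fun v => v == 0) then "Possible" else "Impossible"

-- ===== PRECONDITION & SPEC =====
-- Pre_ excludes exactly the ragged inputs (some row shorter than the number of rows),
-- on which both Pythons raise IndexError.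
def Pre_organizingContainers (container : List (List Int)) : Prop :=
  ∀ row ∈ container, container.length ≤ row.length
instance (container : List (List Int)) : Decidable (Pre_organizingContainers container) := by
  unfold Pre_organizingContainers; infer_instance
def pvWitness_organizingContainers : List (List Int) := [[1, 3], [2, 2]]

def Spec_organizingContainers (container : List (List Int)) (out : String) : Prop :=
  out = organizingContainers_alt container
instance (container : List (List Int)) (out : String) : Decidable (Spec_organizingContainers container out) := by
  unfold Spec_organizingContainers; infer_instance

-- ===== CLAIM (what is proved, stated in full; the proofs are below) =====
def Claim_equal_organizingContainers : Prop :=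
  ∀ (container : List (List Int)), Dom_organizingContainers container →
    Pre_organizingContainers container →
    Spec_organizingContainers container (organizingContainers container)

-- ===== LEMMAS AND PROOFS =====

-- the generic balance-update step B's loop applies twice per index
def pvStep (d : PySem.Dict Int Int) (p : Int × Int) : PySem.Dict Int Int :=
  d.insert p.1 (d.getD p.1 0 + p.2)

-- B's loop body, two updates per index, is a fold of pvStep over the flattened update list
theorem pv_fold2 (l : List Int) (fa fb : Int → Int) :
    ∀ d : PySem.Dict Int Int,
    l.foldl (fun d i => pvStep (pvStep d (fa i, 1)) (fb i, -1)) d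
      = (l.flatMap (fun i => [(fa i, 1), (fb i, -1)])).foldl pvStep d := by
  induction l with
  | nil => intro d; simp
  | cons x rest ih => intro d; simp [List.foldl_cons, ih]

-- net delta recorded at key k = (occurrences among the fa's) - (occurrences among the fb's)
theorem pv_delta (l : List Int) (fa fb : Int → Int) (k : Int) :
    (((l.flatMap (fun i => [(fa i, 1), (fb i, -1)])).filter
        (fun p => p.1 == k)).map (·.2)).sum
      = ((l.map fa).count k : Int) - ((l.map fb).count k : Int) := by
  induction l with
  | nil => simp
  | cons x rest ih =>
    simp only [List.flatMap_cons, List.filter_append, List.map_append, List.sum_append, ih,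
      List.map_cons, List.count_cons]
    by_cases h1 : fa x = k <;> by_cases h2 : fb x = k <;>
      simp [h1, h2] <;> omega

-- lookup in a balance fold: initial value plus the sum of the deltas recorded at that key
theorem pv_getD_foldl_step (l : List (Int × Int)) :
    ∀ d : PySem.Dict Int Int, ∀ v : Int,
    (l.foldl pvStep d).getD v 0
      = d.getD v 0 + ((l.filter (fun p => p.1 == v)).map (·.2)).sum := by
  induction l with
  | nil => intro d v; simp
  | cons p rest ih =>
    intro d v
    rw [List.foldl_cons, ih]
    by_cases h : p.1 = v
    · simp [pvStep, h, PySem.Dict.getD_insert_self]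
      ring
    · simp [pvStep, h, PySem.Dict.getD_insert, Ne.symm h]

-- "all balances are zero" read off through the keys (keys of the fold are Nodup)
theorem pv_values_all_zero (d : PySem.Dict Int Int) (hnd : d.keys.Nodup) :
    (d.values.all (fun v => v == 0) = true) ↔ ∀ k ∈ d.keys, d.getD k 0 = 0 := by
  rw [PySem.Dict.values_eq_map_keys d hnd 0]
  simp [List.all_eq_true]

theorem pv_main_eq (container : List (List Int)) :
    organizingContainers container = organizingContainers_alt container := by
  unfold organizingContainers organizingContainers_alt
  simp only
  set n : Int := (container.length : Int) with hn
  set idx := PySem.List.pyRange 0 n 1 with hidx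
  set fa : Int → Int := fun i => (PySem.List.pyGetD container i []).sum with hfa
  set fb : Int → Int := fun i =>
    (idx.map (fun x => PySem.List.pyGetD (PySem.List.pyGetD container x []) i 0)).sum with hfb
  -- A's loop: two appended-singleton accumulators
  rw [PySem.List.foldl_prod_mk
      (f := fun (acc : List Int) (i : Int) => acc ++ [fa i])
      (g := fun (acc : List Int) (i : Int) => acc ++ [fb i])]
  simp only [PySem.List.foldl_append_singleton_eq_map, List.nil_append]
  -- B's loop: two generic balance updates per index
  have hBfun : (fun (d : PySem.Dict Int Int) i =>
        let r := fa i
        let d := d.insert r (d.getD r 0 + 1)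
        let c := idx.foldl
          (fun c j => c + PySem.List.pyGetD (PySem.List.pyGetD container j []) i 0) 0
        d.insert c (d.getD c 0 + -1))
      = (fun d i => pvStep (pvStep d (fa i, 1)) (fb i, -1)) := by
    funext d i
    simp only [pvStep, PySem.List.foldl_add, zero_add, hfb]
  rw [hBfun, pv_fold2]
  set ups := idx.flatMap (fun i => [(fa i, 1), (fb i, -1)]) with hups
  set D := ups.foldl pvStep PySem.Dict.empty with hD
  have hnodup : D.keys.Nodup := by
    have := PySem.Dict.nodup_keys_foldl_insert_key ups Prod.fst
      (fun d p => d.getD p.1 0 + p.2) PySem.Dict.empty (by simp)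
    exact this
  have hkeys : ∀ k : Int, k ∈ D.keys ↔ k ∈ ups.map Prod.fst := by
    intro k
    rw [hD]
    have := PySem.Dict.keys_foldl_insert_key ups Prod.fst
      (fun d p => d.getD p.1 0 + p.2) PySem.Dict.empty
    rw [show (ups.foldl pvStep PySem.Dict.empty) = (ups.foldl
        (fun d x => d.insert (Prod.fst x) ((fun d p => d.getD p.1 0 + p.2) d x))
        PySem.Dict.empty) from rfl, this]
    simp [PySem.Set.update_nil_left, PySem.Set.mem_ofList]
  have hget : ∀ k : Int, D.getD k 0 = ((idx.map fa).count k : Int) - ((idx.map fb).count k : Int) := by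
    intro k
    rw [hD, pv_getD_foldl_step, hups, pv_delta]
    simp
  have hcond : (D.values.all (fun v => v == 0) = true) ↔ (idx.map fa).Perm (idx.map fb) := by
    rw [pv_values_all_zero D hnodup, List.perm_iff_count]
    constructor
    · intro h k
      by_cases hk : k ∈ D.keys
      · have := h k hk
        rw [hget] at this
        omega
      · rw [hkeys] at hk
        have ha : (idx.map fa).count k = 0 := by
          rw [List.count_eq_zero]
          intro hmem
          apply hk
          rcases List.mem_map.mp hmem with ⟨i, hi, hik⟩
          simp only [hups, List.map_flatMap, List.mem_flatMap]
          exact ⟨i, hi, by simp [hik]⟩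
        have hb : (idx.map fb).count k = 0 := by
          rw [List.count_eq_zero]
          intro hmem
          apply hk
          rcases List.mem_map.mp hmem with ⟨i, hi, hik⟩
          simp only [hups, List.map_flatMap, List.mem_flatMap]
          exact ⟨i, hi, by simp [hik]⟩
        omega
    · intro h k _
      rw [hget, h k]
      omega
  by_cases hP : PySem.List.sorted (idx.map fa) (fun v => v) false
      = PySem.List.sorted (idx.map fb) (fun v => v) false
  · rw [if_pos hP, if_pos (hcond.mpr ((PySem.List.sorted_id_eq_sorted_id_iff_perm _ _).mp hP))]
  · rw [if_neg hP, if_neg]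
    intro hall
    exact hP ((PySem.List.sorted_id_eq_sorted_id_iff_perm _ _).mpr (hcond.mp hall))

-- ===== VERDICT (by name: the statement is the Claim_ definition above) =====
theorem organizingContainers_spec : Claim_equal_organizingContainers := by
  intro container _ _
  exact pv_main_eq container
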